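-- pv_equiv track=rewrite | github.com/apinkney97/aoc | aoc/aoc2024/day23.py | part1
-- ===== SOURCE A (Python) =====
-- def find_triples(edges: dict[str, set[str]]) -> list[tuple[str, str, str]]:
--     seen: set[tuple[str, str, str]] = set()
--     for n1 in edges:
--         for n2 in edges[n1]:
--             for n3 in edges[n2]:
--                 if n1 in edges[n3]:
--                     triple = sorted({n1, n2, n3})
--                     if len(triple) == 3:
--                         first, second, third = triple
--                         seen.add((first, second, third))
--     return sorted(seen)
--
-- def part1(data) -> int:
--     edges: dict[str, set[str]] = {}
--     for a, b in data:
--         edges.setdefault(a, set()).add(b)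
--         edges.setdefault(b, set()).add(a)
--
--     result = 0
--     for triple in find_triples(edges):
--         if any(x.startswith("t") for x in triple):
--             result += 1
--     return result
-- ===== SOURCE B (Python) =====
-- def part1(data) -> int:
--     # Build the node set and a symmetric set of directed edge pairs,
--     # then count each triangle exactly once by enumerating strictly
--     # increasing triples u < v < w over the sorted node list.
--     nodes = set()
--     adj = set()
--     for a, b in data:
--         nodes.add(a)
--         nodes.add(b)
--         adj.add((a, b))
--         adj.add((b, a))
--
--     count = 0
--     rest = sorted(nodes)
--     while rest:
--         u, rest = rest[0], rest[1:]
--         for j, v in enumerate(rest):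
--             if (u, v) in adj:
--                 for w in rest[j + 1:]:
--                     if ((u, w) in adj and (v, w) in adj
--                             and (u.startswith("t") or v.startswith("t")
--                                  or w.startswith("t"))):
--                         count += 1
--     return count
-- ===== Notes on version B (the rewrite author's own statement) =====
-- stated objective: alternative
-- what changed: Instead of walking all directed 2-paths n1->n2->n3 through an adjacency dict, checking closure and deduplicating sorted triples in a set that is finally sorted and re-scanned, B keeps a flat set of symmetric edge pairs and counts each triangle exactly once by enumerating strictly increasing triples u<v<w over the sorted node list, so no dedup set and no final sort/pass are needed.
import Mathlib
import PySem

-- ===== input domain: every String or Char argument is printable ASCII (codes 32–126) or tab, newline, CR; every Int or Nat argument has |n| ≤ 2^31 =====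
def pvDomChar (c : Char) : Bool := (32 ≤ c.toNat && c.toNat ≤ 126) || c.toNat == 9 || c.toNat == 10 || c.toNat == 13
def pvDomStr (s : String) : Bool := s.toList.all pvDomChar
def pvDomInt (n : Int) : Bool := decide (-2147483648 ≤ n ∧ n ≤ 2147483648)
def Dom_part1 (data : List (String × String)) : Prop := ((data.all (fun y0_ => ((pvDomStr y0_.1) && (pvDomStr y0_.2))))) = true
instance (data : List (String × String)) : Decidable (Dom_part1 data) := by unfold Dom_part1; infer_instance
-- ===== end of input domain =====

-- B replaces A's directed 2-path walk + sorted-triple dedup set + final sort by a flat symmetric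
-- edge-pair set and a single enumeration of strictly increasing node triples u < v < w (objective:
-- alternative algorithm of similar cost).

-- ===== PORT A =====
-- edges.setdefault(a, set()).add(b) mutates the dict entry in place: exactly d[a] = d.get(a, set()) | {b},
-- i.e. Dict.modify (new keys appended at the end, existing keys keep their position).
def buildEdges (data : List (String × String)) : PySem.Dict String (PySem.Set String) :=
  data.foldl (fun edges p =>
    (edges.modify p.1 PySem.Set.empty (fun s => PySem.Set.add s p.2)).modify p.2 PySem.Set.empty
      (fun s => PySem.Set.add s p.1)) PySem.Dict.empty

-- triple = sorted({n1, n2, n3}); if len(triple) == 3: seen.add(tuple(triple))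
def addTriple (seen : PySem.Set (String × String × String)) (n1 n2 n3 : String) :
    PySem.Set (String × String × String) :=
  match PySem.List.sorted (PySem.Set.ofList [n1, n2, n3]) (fun x => x) with
  | [a, b, c] => PySem.Set.add seen (a, b, c)
  | _ => seen

-- Python iterates the neighbour sets in hash order and sorted(seen) sorts tuples lexicographically;
-- the fold below iterates the Set lists in insertion order and sorts by the three components via
-- three stable sorts (Python's tuple order) — the returned sorted list is the same.
def findTriples (edges : PySem.Dict String (PySem.Set String)) : List (String × String × String) :=
  let seen := edges.keys.foldl (fun seen n1 =>
    (edges.getD n1 PySem.Set.empty).foldl (fun seen n2 =>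
      (edges.getD n2 PySem.Set.empty).foldl (fun seen n3 =>
        if PySem.Set.contains (edges.getD n3 PySem.Set.empty) n1 then addTriple seen n1 n2 n3
        else seen) seen) seen) PySem.Set.empty
  PySem.List.sorted (PySem.List.sorted (PySem.List.sorted seen (fun t => t.2.2)) (fun t => t.2.1))
    (fun t => t.1)

def part1 (data : List (String × String)) : Int :=
  (findTriples (buildEdges data)).foldl (fun result t =>
    if [t.1, t.2.1, t.2.2].any (fun x => PySem.Str.startswith x "t") then result + 1 else result) 0

-- ===== PORT B =====
-- for w in rest[j+1:]: if (u,w) in adj and (v,w) in adj and (u|v|w starts with "t"): count += 1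
def altInner (adj : PySem.Set (String × String)) (u v : String) (tail : List String) (c : Int) :
    Int :=
  tail.foldl (fun c w =>
    if PySem.Set.contains adj (u, w) && PySem.Set.contains adj (v, w) &&
        (PySem.Str.startswith u "t" || PySem.Str.startswith v "t" || PySem.Str.startswith w "t")
    then c + 1 else c) c

-- for j, v in enumerate(rest): if (u, v) in adj: <inner loop over rest[j+1:]>
def altMid (adj : PySem.Set (String × String)) (u : String) (rest : List String) (c : Int) : Int :=
  (PySem.List.enumerate rest).foldl (fun c jv =>
    if PySem.Set.contains adj (u, jv.2) then
      altInner adj u jv.2 (PySem.List.slice rest (some (jv.1 + 1)) none) c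
    else c) c

-- while rest: u, rest = rest[0], rest[1:]; <middle loop>
def altOuter (adj : PySem.Set (String × String)) : List String → Int → Int
  | [], c => c
  | u :: rest, c => altOuter adj rest (altMid adj u rest c)

def part1_alt (data : List (String × String)) : Int :=
  let na := data.foldl
    (fun (na : PySem.Set String × PySem.Set (String × String)) p =>
      (PySem.Set.add (PySem.Set.add na.1 p.1) p.2,
       PySem.Set.add (PySem.Set.add na.2 (p.1, p.2)) (p.2, p.1)))
    (PySem.Set.empty, PySem.Set.empty)
  altOuter na.2 (PySem.List.sorted na.1 (fun x => x)) 0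

-- ===== PRECONDITION & SPEC =====
def Spec_part1 (data : List (String × String)) (out : Int) : Prop := out = part1_alt data
instance (data : List (String × String)) (out : Int) : Decidable (Spec_part1 data out) := by
  unfold Spec_part1; infer_instance

-- ===== CLAIM (what is proved, stated in full; the proofs are below) =====
def Claim_equal_part1 : Prop := ∀ (data : List (String × String)), Dom_part1 data → Spec_part1 data (part1 data)

-- ===== LEMMAS AND PROOFS =====

-- the symmetric adjacency relation and the node predicate both programs realise
def Adj (data : List (String × String)) (x y : String) : Prop := (x, y) ∈ data ∨ (y, x) ∈ data
def InNodes (data : List (String × String)) (x : String) : Prop := ∃ p ∈ data, x = p.1 ∨ x = p.2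
def Tri (data : List (String × String)) (a b c : String) : Prop :=
  a < b ∧ b < c ∧ Adj data a b ∧ Adj data a c ∧ Adj data b c

-- proof-side names for the two sides' intermediate data (definitionally the ports' terms)
def seenOf (data : List (String × String)) : PySem.Set (String × String × String) :=
  (buildEdges data).keys.foldl (fun seen n1 =>
    ((buildEdges data).getD n1 PySem.Set.empty).foldl (fun seen n2 =>
      ((buildEdges data).getD n2 PySem.Set.empty).foldl (fun seen n3 =>
        if PySem.Set.contains ((buildEdges data).getD n3 PySem.Set.empty) n1 then
          addTriple seen n1 n2 n3
        else seen) seen) seen) PySem.Set.empty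

def nodesSetOf (data : List (String × String)) : PySem.Set String :=
  data.foldl (fun s p => PySem.Set.add (PySem.Set.add s p.1) p.2) PySem.Set.empty

def adjSetOf (data : List (String × String)) : PySem.Set (String × String) :=
  data.foldl (fun s p => PySem.Set.add (PySem.Set.add s (p.1, p.2)) (p.2, p.1)) PySem.Set.empty

def pA : String × String × String → Bool :=
  fun t => [t.1, t.2.1, t.2.2].any (fun x => PySem.Str.startswith x "t")

def qin (adj : PySem.Set (String × String)) (u v : String) : String → Bool := fun w =>
  PySem.Set.contains adj (u, w) && PySem.Set.contains adj (v, w) &&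
    (PySem.Str.startswith u "t" || PySem.Str.startswith v "t" || PySem.Str.startswith w "t")

def qmid (adj : PySem.Set (String × String)) (u : String) : List String → Bool := fun l =>
  match l with
  | [v, w] => PySem.Set.contains adj (u, v) && qin adj u v w
  | _ => false

def qtop (adj : PySem.Set (String × String)) : List String → Bool := fun l =>
  match l with
  | [u, v, w] => PySem.Set.contains adj (u, v) && qin adj u v w
  | _ => false

def TripleOf (n1 n2 n3 : String) (t : String × String × String) : Prop :=
  PySem.List.sorted (PySem.Set.ofList [n1, n2, n3]) (fun x => x) = [t.1, t.2.1, t.2.2]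

lemma foldl_preserve {σ α : Type} (f : σ → α → σ) (P : σ → Prop)
    (h : ∀ s x, P s → P (f s x)) : ∀ (l : List α) (s : σ), P s → P (l.foldl f s) := by
  intro l
  induction l with
  | nil => intro s hs; exact hs
  | cons x xs ih => intro s hs; exact ih (f s x) (h s x hs)

lemma nodup_set_add {α : Type} [BEq α] [LawfulBEq α] (s : PySem.Set α) (x : α)
    (h : s.Nodup) : (PySem.Set.add s x).Nodup := by
  unfold PySem.Set.add
  split
  · exact h
  · rename_i hc
    simp only [List.nodup_append, List.nodup_cons, List.nodup_nil, and_true, List.not_mem_nil,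
      not_false_eq_true, true_and]
    refine ⟨h, fun a ha b hb => ?_⟩
    rw [List.mem_singleton] at hb
    subst hb
    exact fun heq => hc ((PySem.Set.contains_iff s b).mpr (heq ▸ ha))

lemma adj_symm {data : List (String × String)} {x y : String} (h : Adj data x y) :
    Adj data y x := h.symm

lemma nodes_fold_mem (data : List (String × String)) :
    ∀ (s : PySem.Set String) (x : String),
      x ∈ data.foldl (fun s p => PySem.Set.add (PySem.Set.add s p.1) p.2) s ↔
        x ∈ s ∨ InNodes data x := by
  induction data with
  | nil => simp [InNodes]
  | cons p rest ih =>
    intro s x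
    simp only [List.foldl_cons, ih, PySem.Set.mem_add, InNodes, List.mem_cons]
    aesop

lemma adj_fold_mem (data : List (String × String)) :
    ∀ (s : PySem.Set (String × String)) (x y : String),
      (x, y) ∈ data.foldl
          (fun s p => PySem.Set.add (PySem.Set.add s (p.1, p.2)) (p.2, p.1)) s ↔
        (x, y) ∈ s ∨ Adj data x y := by
  induction data with
  | nil => simp [Adj]
  | cons p rest ih =>
    intro s x y
    simp only [List.foldl_cons, ih, PySem.Set.mem_add, Adj, List.mem_cons,
      Prod.ext_iff]
    aesop

lemma mem_nodesSetOf (data : List (String × String)) (x : String) :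
    x ∈ nodesSetOf data ↔ InNodes data x := by
  rw [nodesSetOf, nodes_fold_mem]
  simp [PySem.Set.empty]

lemma contains_adjSetOf (data : List (String × String)) (x y : String) :
    PySem.Set.contains (adjSetOf data) (x, y) = true ↔ Adj data x y := by
  rw [PySem.Set.contains_iff, adjSetOf, adj_fold_mem]
  simp [PySem.Set.empty]

lemma nodup_nodesSetOf (data : List (String × String)) : (nodesSetOf data).Nodup := by
  exact foldl_preserve _ _ (fun s p h => nodup_set_add _ _ (nodup_set_add _ _ h)) data
    PySem.Set.empty List.nodup_nil

lemma mem_keys_modify {κ ν : Type} [BEq κ] [LawfulBEq κ] (d : PySem.Dict κ ν) (k k' : κ)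
    (d0 : ν) (f : ν → ν) : k' ∈ (d.modify k d0 f).keys ↔ k' = k ∨ k' ∈ d.keys := by
  rw [PySem.Dict.keys_modify]; exact PySem.Dict.mem_keys_insert _ _ _ _

lemma getD_buildEdges_fold (data : List (String × String)) :
    ∀ (d : PySem.Dict String (PySem.Set String)) (x y : String),
      y ∈ (data.foldl (fun edges p =>
            (edges.modify p.1 PySem.Set.empty (fun s => PySem.Set.add s p.2)).modify p.2
              PySem.Set.empty (fun s => PySem.Set.add s p.1)) d).getD x PySem.Set.empty ↔
        y ∈ d.getD x PySem.Set.empty ∨ Adj data x y := by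
  induction data with
  | nil => simp [Adj]
  | cons p rest ih =>
    intro d x y
    simp only [List.foldl_cons, ih, PySem.Dict.getD_modify, Adj, List.mem_cons, Prod.ext_iff]
    by_cases hb : x = p.2 <;> by_cases ha : x = p.1 <;>
      simp [ha, hb, PySem.Set.mem_add] <;> aesop

lemma keys_buildEdges_fold (data : List (String × String)) :
    ∀ (d : PySem.Dict String (PySem.Set String)) (x : String),
      x ∈ (data.foldl (fun edges p =>
            (edges.modify p.1 PySem.Set.empty (fun s => PySem.Set.add s p.2)).modify p.2
              PySem.Set.empty (fun s => PySem.Set.add s p.1)) d).keys ↔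
        x ∈ d.keys ∨ InNodes data x := by
  induction data with
  | nil => simp [InNodes]
  | cons p rest ih =>
    intro d x
    simp only [List.foldl_cons, ih, mem_keys_modify, InNodes, List.mem_cons]
    aesop

lemma mem_getD_buildEdges (data : List (String × String)) (x y : String) :
    y ∈ (buildEdges data).getD x PySem.Set.empty ↔ Adj data x y := by
  rw [buildEdges, getD_buildEdges_fold]
  simp [PySem.Dict.getD_empty, PySem.Set.empty]

lemma mem_keys_buildEdges (data : List (String × String)) (x : String) :
    x ∈ (buildEdges data).keys ↔ InNodes data x := by
  rw [buildEdges, keys_buildEdges_fold]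
  simp [PySem.Dict.keys_empty]

lemma mem_addTriple (s : PySem.Set (String × String × String)) (n1 n2 n3 : String)
    (t : String × String × String) :
    t ∈ addTriple s n1 n2 n3 ↔ t ∈ s ∨ TripleOf n1 n2 n3 t := by
  unfold addTriple TripleOf
  split
  · rename_i a b c h
    rw [h, PySem.Set.mem_add]
    rcases t with ⟨t1, t2, t3⟩
    simp [Prod.ext_iff, eq_comm]
  · rename_i h
    have : ¬ PySem.List.sorted (PySem.Set.ofList [n1, n2, n3]) (fun x => x) =
        [t.1, t.2.1, t.2.2] := fun hc => h t.1 t.2.1 t.2.2 hc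
    simp [this]

lemma tripleOf_iff (n1 n2 n3 a b c : String) :
    TripleOf n1 n2 n3 (a, b, c) ↔
      a < b ∧ b < c ∧ (∀ x, (x = n1 ∨ x = n2 ∨ x = n3) ↔ (x = a ∨ x = b ∨ x = c)) := by
  unfold TripleOf
  dsimp only
  constructor
  · intro h
    have hpw := PySem.List.sorted_ofList_pairwise_lt [n1, n2, n3]
    rw [h] at hpw
    have h1 := (List.pairwise_cons.mp hpw).1 b (by simp)
    have h2 := (List.pairwise_cons.mp (List.pairwise_cons.mp hpw).2).1 c (by simp)
    refine ⟨h1, h2, fun x => ?_⟩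
    have := PySem.List.mem_sorted (PySem.Set.ofList [n1, n2, n3]) (fun x => x) false x
    rw [h, PySem.Set.mem_ofList] at this
    simpa using this.symm
  · rintro ⟨hab, hbc, hmem⟩
    apply PySem.List.sorted_eq_of_perm_of_pairwise_lt
    · apply List.perm_of_nodup_nodup_toFinset_eq
      · refine List.nodup_cons.mpr ⟨?_, List.nodup_cons.mpr ⟨?_, List.nodup_singleton _⟩⟩
        · intro hmem
          rcases List.mem_cons.mp hmem with h' | h'
          · exact absurd h' (ne_of_lt hab)
          · rw [List.mem_singleton] at h'
            exact absurd h' (ne_of_lt (lt_trans hab hbc))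
        · intro hmem
          rw [List.mem_singleton] at hmem
          exact absurd hmem (ne_of_lt hbc)
      · exact PySem.Set.nodup_ofList _
      · ext x
        simp only [List.mem_toFinset, List.mem_cons, List.not_mem_nil, or_false,
          PySem.Set.mem_ofList]
        exact (hmem x).symm
    · refine List.pairwise_cons.mpr ⟨?_, List.pairwise_cons.mpr ⟨?_, by simp⟩⟩
      · intro y hy
        rcases List.mem_cons.mp hy with rfl | hy
        · exact hab
        · rw [List.mem_singleton] at hy
          subst hy
          exact lt_trans hab hbc
      · intro y hy
        rw [List.mem_singleton] at hy
        subst hy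
        exact hbc

lemma adj_cycle {data : List (String × String)} {n1 n2 n3 x y : String}
    (h12 : Adj data n1 n2) (h23 : Adj data n2 n3) (h31 : Adj data n3 n1)
    (hx : x = n1 ∨ x = n2 ∨ x = n3) (hy : y = n1 ∨ y = n2 ∨ y = n3) (hne : x ≠ y) :
    Adj data x y := by
  rcases hx with rfl | rfl | rfl <;> rcases hy with rfl | rfl | rfl <;>
    first
      | exact absurd rfl hne
      | exact h12
      | exact h23
      | exact h31
      | exact adj_symm h12
      | exact adj_symm h23
      | exact adj_symm h31

lemma mem_seenOf (data : List (String × String)) (t : String × String × String) :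
    t ∈ seenOf data ↔
      ∃ n1 ∈ (buildEdges data).keys, ∃ n2 ∈ (buildEdges data).getD n1 PySem.Set.empty,
        ∃ n3 ∈ (buildEdges data).getD n2 PySem.Set.empty,
          n1 ∈ (buildEdges data).getD n3 PySem.Set.empty ∧ TripleOf n1 n2 n3 t := by
  unfold seenOf
  generalize hE : buildEdges data = E
  have mem3 : ∀ (n1 n2 : String) (l : List String) (s : PySem.Set (String × String × String)),
      t ∈ l.foldl (fun seen n3 =>
          if PySem.Set.contains (E.getD n3 PySem.Set.empty) n1 then addTriple seen n1 n2 n3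
          else seen) s ↔
        t ∈ s ∨ ∃ n3 ∈ l, n1 ∈ E.getD n3 PySem.Set.empty ∧ TripleOf n1 n2 n3 t := by
    intro n1 n2 l
    induction l with
    | nil => simp
    | cons n3 rest ih =>
      intro s
      rw [List.foldl_cons]
      by_cases h : PySem.Set.contains (E.getD n3 PySem.Set.empty) n1 = true
      · rw [if_pos h, ih]
        have h' := (PySem.Set.contains_iff _ _).mp h
        rw [mem_addTriple]
        constructor
        · rintro ((hs | htr) | ⟨m, hm, hmem, htr⟩)
          · exact Or.inl hs
          · exact Or.inr ⟨n3, List.mem_cons_self, h', htr⟩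
          · exact Or.inr ⟨m, List.mem_cons_of_mem _ hm, hmem, htr⟩
        · rintro (hs | ⟨m, hm, hmem, htr⟩)
          · exact Or.inl (Or.inl hs)
          · rcases List.mem_cons.mp hm with rfl | hm'
            · exact Or.inl (Or.inr htr)
            · exact Or.inr ⟨m, hm', hmem, htr⟩
      · rw [if_neg h, ih]
        have h' : n1 ∉ E.getD n3 PySem.Set.empty := fun hc =>
          h ((PySem.Set.contains_iff _ _).mpr hc)
        constructor
        · rintro (hs | ⟨m, hm, hmem, htr⟩)
          · exact Or.inl hs
          · exact Or.inr ⟨m, List.mem_cons_of_mem _ hm, hmem, htr⟩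
        · rintro (hs | ⟨m, hm, hmem, htr⟩)
          · exact Or.inl hs
          · rcases List.mem_cons.mp hm with rfl | hm'
            · exact absurd hmem h'
            · exact Or.inr ⟨m, hm', hmem, htr⟩
  have mem2 : ∀ (n1 : String) (l : List String) (s : PySem.Set (String × String × String)),
      t ∈ l.foldl (fun seen n2 =>
          (E.getD n2 PySem.Set.empty).foldl (fun seen n3 =>
            if PySem.Set.contains (E.getD n3 PySem.Set.empty) n1 then addTriple seen n1 n2 n3
            else seen) seen) s ↔
        t ∈ s ∨ ∃ n2 ∈ l, ∃ n3 ∈ E.getD n2 PySem.Set.empty,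
          n1 ∈ E.getD n3 PySem.Set.empty ∧ TripleOf n1 n2 n3 t := by
    intro n1 l
    induction l with
    | nil => simp
    | cons n2 rest ih =>
      intro s
      simp only [List.foldl_cons, ih, mem3, List.mem_cons]
      aesop
  have mem1 : ∀ (l : List String) (s : PySem.Set (String × String × String)),
      t ∈ l.foldl (fun seen n1 =>
          (E.getD n1 PySem.Set.empty).foldl (fun seen n2 =>
            (E.getD n2 PySem.Set.empty).foldl (fun seen n3 =>
              if PySem.Set.contains (E.getD n3 PySem.Set.empty) n1 then addTriple seen n1 n2 n3
              else seen) seen) seen) s ↔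
        t ∈ s ∨ ∃ n1 ∈ l, ∃ n2 ∈ E.getD n1 PySem.Set.empty, ∃ n3 ∈ E.getD n2 PySem.Set.empty,
          n1 ∈ E.getD n3 PySem.Set.empty ∧ TripleOf n1 n2 n3 t := by
    intro l
    induction l with
    | nil => simp
    | cons n1 rest ih =>
      intro s
      simp only [List.foldl_cons, ih, mem2, List.mem_cons]
      aesop
  rw [mem1]
  simp [PySem.Set.empty]

lemma mem_seenOf_iff_tri (data : List (String × String)) (a b c : String) :
    (a, b, c) ∈ seenOf data ↔ Tri data a b c := by
  rw [mem_seenOf]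
  constructor
  · rintro ⟨n1, _, n2, h12, n3, h23, h31, htr⟩
    rw [mem_getD_buildEdges] at h12 h23 h31
    rw [tripleOf_iff] at htr
    obtain ⟨hab, hbc, hmem⟩ := htr
    have hma : a = n1 ∨ a = n2 ∨ a = n3 := (hmem a).mpr (Or.inl rfl)
    have hmb : b = n1 ∨ b = n2 ∨ b = n3 := (hmem b).mpr (Or.inr (Or.inl rfl))
    have hmc : c = n1 ∨ c = n2 ∨ c = n3 := (hmem c).mpr (Or.inr (Or.inr rfl))
    exact ⟨hab, hbc, adj_cycle h12 h23 h31 hma hmb (ne_of_lt hab),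
      adj_cycle h12 h23 h31 hma hmc (ne_of_lt (lt_trans hab hbc)),
      adj_cycle h12 h23 h31 hmb hmc (ne_of_lt hbc)⟩
  · rintro ⟨hab, hbc, hAB, hAC, hBC⟩
    have haN : InNodes data a := by
      rcases hAB with h | h
      · exact ⟨(a, b), h, Or.inl rfl⟩
      · exact ⟨(b, a), h, Or.inr rfl⟩
    refine ⟨a, (mem_keys_buildEdges data a).mpr haN, b, (mem_getD_buildEdges data a b).mpr hAB,
      c, (mem_getD_buildEdges data b c).mpr hBC,
      (mem_getD_buildEdges data c a).mpr (adj_symm hAC), ?_⟩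
    rw [tripleOf_iff]
    exact ⟨hab, hbc, fun x => Iff.rfl⟩

lemma nodup_seenOf (data : List (String × String)) : (seenOf data).Nodup := by
  unfold seenOf
  apply foldl_preserve _ _ (fun s n1 h => ?_) _ _ List.nodup_nil
  apply foldl_preserve _ _ (fun s n2 h => ?_) _ _ h
  apply foldl_preserve _ _ (fun s n3 h => ?_) _ _ h
  split
  · unfold addTriple
    split
    · exact nodup_set_add _ _ h
    · exact h
  · exact h

lemma part1_eq_countP (data : List (String × String)) :
    part1 data = ((seenOf data).countP pA : Int) := by
  have h1 : part1 data = (PySem.List.sorted (PySem.List.sorted (PySem.List.sorted (seenOf data)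
      (fun t => t.2.2)) (fun t => t.2.1)) (fun t => t.1)).foldl
        (fun result t => if pA t then result + 1 else result) 0 := rfl
  rw [h1, PySem.List.foldl_if_add_one pA]
  have hperm : (PySem.List.sorted (PySem.List.sorted (PySem.List.sorted (seenOf data)
      (fun t => t.2.2)) (fun t => t.2.1)) (fun t => t.1)).Perm (seenOf data) :=
    ((PySem.List.sorted_perm _ _ _).trans (PySem.List.sorted_perm _ _ _)).trans
      (PySem.List.sorted_perm _ _ _)
  rw [hperm.countP_eq pA]
  simp

lemma altInner_eq (adj : PySem.Set (String × String)) (u v : String) (tail : List String)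
    (c : Int) : altInner adj u v tail c = c + (tail.countP (qin adj u v) : Int) := by
  exact PySem.List.foldl_if_add_one (qin adj u v) tail c

lemma countP_and_const {α : Type} (b : Bool) (p : α → Bool) (l : List α) :
    l.countP (fun w => b && p w) = if b then l.countP p else 0 := by
  cases b <;> simp

lemma altMid_loop (adj : PySem.Set (String × String)) (u : String) (full : List String) :
    ∀ (rest : List String) (k : Nat), full.drop k = rest → ∀ (c : Int),
      (PySem.List.enumerate rest (k : Int)).foldl (fun c jv =>
          if PySem.Set.contains adj (u, jv.2) then
            altInner adj u jv.2 (PySem.List.slice full (some (jv.1 + 1)) none) c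
          else c) c =
        c + ((PySem.List.combinations rest 2).countP (qmid adj u) : Int) := by
  intro rest
  induction rest with
  | nil =>
    intro k _ c
    simp [PySem.List.enumerate, PySem.List.combinations_nil_succ]
  | cons v t ih =>
    intro k hdrop c
    have hdrop' : full.drop (k + 1) = t := by
      rw [List.drop_add_one_eq_tail_drop, hdrop]
      rfl
    have hsl : PySem.List.slice full (some ((k : Int) + 1)) none = t := by
      rw [PySem.List.slice_from full (by omega : (0 : Int) ≤ (k : Int) + 1)]
      have hn : ((k : Int) + 1).toNat = k + 1 := by omega
      rw [hn, hdrop']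
    have hcast : (k : Int) + 1 = ((k + 1 : Nat) : Int) := by push_cast; ring
    simp only [PySem.List.enumerate_cons, List.foldl_cons]
    rw [hsl, hcast, ih (k + 1) hdrop']
    rw [PySem.List.combinations_cons_succ, List.countP_append, List.countP_map,
      PySem.List.combinations_one, List.countP_map]
    have hfun : (qmid adj u ∘ fun c => v :: c) ∘ (fun w => [w]) =
        fun w => PySem.Set.contains adj (u, v) && qin adj u v w := by
      funext w
      rfl
    rw [hfun, countP_and_const]
    by_cases h : PySem.Set.contains adj (u, v) = true
    · rw [if_pos h, if_pos h, altInner_eq]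
      push_cast
      ring
    · rw [if_neg h, if_neg h]
      push_cast
      ring

lemma altMid_eq (adj : PySem.Set (String × String)) (u : String) (rest : List String)
    (c : Int) :
    altMid adj u rest c = c + ((PySem.List.combinations rest 2).countP (qmid adj u) : Int) := by
  have h := altMid_loop adj u rest rest 0 rfl c
  unfold altMid
  simpa using h

lemma qtop_cons (adj : PySem.Set (String × String)) (u : String) :
    (fun l => qtop adj (u :: l)) = qmid adj u := by
  funext l
  rcases l with _ | ⟨v, _ | ⟨w, _ | _⟩⟩ <;> rfl

lemma altOuter_eq (adj : PySem.Set (String × String)) :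
    ∀ (ns : List String) (c : Int),
      altOuter adj ns c = c + ((PySem.List.combinations ns 3).countP (qtop adj) : Int) := by
  intro ns
  induction ns with
  | nil =>
    intro c
    simp [altOuter, PySem.List.combinations_nil_succ]
  | cons u rest ih =>
    intro c
    rw [show altOuter adj (u :: rest) c = altOuter adj rest (altMid adj u rest c) from rfl]
    rw [ih, altMid_eq, PySem.List.combinations_cons_succ, List.countP_append, List.countP_map]
    have hfun : qtop adj ∘ (fun l => u :: l) = qmid adj u := by
      funext l
      exact congrFun (qtop_cons adj u) l
    rw [hfun]
    push_cast
    ring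

lemma nodup_combinations {α : Type} :
    ∀ (xs : List α) (r : Nat), xs.Nodup → (PySem.List.combinations xs r).Nodup := by
  intro xs
  induction xs with
  | nil =>
    intro r _
    cases r with
    | zero => simp [PySem.List.combinations_zero]
    | succ r => simp [PySem.List.combinations_nil_succ]
  | cons x xs ih =>
    intro r hnd
    have hx : x ∉ xs := (List.nodup_cons.mp hnd).1
    have hxs := (List.nodup_cons.mp hnd).2
    cases r with
    | zero => simp [PySem.List.combinations_zero]
    | succ r =>
      rw [PySem.List.combinations_cons_succ]
      refine List.Nodup.append (List.Nodup.map ?_ (ih r hxs)) (ih (r + 1) hxs) ?_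
      · intro a b hab
        exact List.tail_eq_of_cons_eq hab
      · intro l hl1 hl2
        obtain ⟨l', _, rfl⟩ := List.mem_map.mp hl1
        have hc := (PySem.List.mem_combinations_iff xs (r + 1) (x :: l')).mp hl2
        exact hx (hc.1.subset List.mem_cons_self)

lemma sublist_of_pairwise_lt_subset :
    ∀ (ns l : List String), ns.Pairwise (· < ·) → l.Pairwise (· < ·) →
      (∀ x ∈ l, x ∈ ns) → l.Sublist ns := by
  intro ns
  induction ns with
  | nil =>
    intro l _ _ hsub
    cases l with
    | nil => exact List.Sublist.refl []
    | cons x l => exact absurd (hsub x List.mem_cons_self) (List.not_mem_nil)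
  | cons y ns ih =>
    intro l hns hl hsub
    cases l with
    | nil => exact List.nil_sublist _
    | cons x l =>
      have hns' := (List.pairwise_cons.mp hns).2
      by_cases hxy : x = y
      · subst hxy
        refine List.Sublist.cons₂ x (ih l hns' ((List.pairwise_cons.mp hl).2) ?_)
        intro z hz
        have hz' := hsub z (List.mem_cons_of_mem _ hz)
        rcases List.mem_cons.mp hz' with rfl | h
        · exact absurd ((List.pairwise_cons.mp hl).1 z hz) (lt_irrefl z)
        · exact h
      · refine List.Sublist.cons y (ih (x :: l) hns' hl ?_)
        intro z hz
        have hz' := hsub z hz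
        rcases List.mem_cons.mp hz' with rfl | h
        · exfalso
          rcases List.mem_cons.mp (hsub x List.mem_cons_self) with rfl | hxns
          · exact hxy rfl
          · have hyx : z < x := (List.pairwise_cons.mp hns).1 x hxns
            rcases List.mem_cons.mp hz with rfl | hzl
            · exact hxy rfl
            · exact absurd (lt_trans ((List.pairwise_cons.mp hl).1 z hzl) hyx)
                (lt_irrefl x)
        · exact h

lemma inNodes_of_adj_left {data : List (String × String)} {x y : String}
    (h : Adj data x y) : InNodes data x := by
  rcases h with h | h
  · exact ⟨(x, y), h, Or.inl rfl⟩
  · exact ⟨(y, x), h, Or.inr rfl⟩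

lemma inNodes_of_adj_right {data : List (String × String)} {x y : String}
    (h : Adj data x y) : InNodes data y := inNodes_of_adj_left (adj_symm h)

lemma pairwise_lt_triple {a b c : String} (hab : a < b) (hbc : b < c) :
    [a, b, c].Pairwise (· < ·) := by
  refine List.pairwise_cons.mpr ⟨?_, List.pairwise_cons.mpr ⟨?_, by simp⟩⟩
  · intro y hy
    rcases List.mem_cons.mp hy with rfl | hy
    · exact hab
    · rw [List.mem_singleton] at hy
      subst hy
      exact lt_trans hab hbc
  · intro y hy
    rw [List.mem_singleton] at hy
    subst hy
    exact hbc

lemma countP_comb_eq_countP_seen (data : List (String × String)) :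
    (PySem.List.combinations (PySem.List.sorted (nodesSetOf data) (fun x => x)) 3).countP
        (qtop (adjSetOf data)) =
      (seenOf data).countP pA := by
  set ns := PySem.List.sorted (nodesSetOf data) (fun x => x) with hns
  set adj := adjSetOf data with hadj
  have hnsnd : ns.Nodup :=
    ((PySem.List.sorted_perm (nodesSetOf data) (fun x => x) false).nodup_iff).mpr
      (nodup_nodesSetOf data)
  have hnslt : ns.Pairwise (· < ·) :=
    ((PySem.List.sorted_pairwise (nodesSetOf data) (fun x => x)).and hnsnd).imp
      (fun h => lt_of_le_of_ne h.1 h.2)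
  have hnsmem : ∀ x, x ∈ ns ↔ InNodes data x := fun x =>
    (PySem.List.mem_sorted (nodesSetOf data) (fun x => x) false x).trans
      (mem_nodesSetOf data x)
  rw [List.countP_eq_length_filter, List.countP_eq_length_filter]
  have hperm : (List.filter (qtop adj) (PySem.List.combinations ns 3)).Perm
      (((seenOf data).filter pA).map (fun t => [t.1, t.2.1, t.2.2])) := by
    apply List.perm_of_nodup_nodup_toFinset_eq
    · exact (nodup_combinations ns 3 hnsnd).filter _
    · refine List.Nodup.map ?_ ((nodup_seenOf data).filter _)
      rintro ⟨a1, b1, c1⟩ ⟨a2, b2, c2⟩ h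
      simp only [List.cons.injEq, and_true] at h
      obtain ⟨rfl, rfl, rfl⟩ := h
      rfl
    · ext l
      simp only [List.mem_toFinset, List.mem_filter, List.mem_map]
      constructor
      · rintro ⟨hmem, hq⟩
        obtain ⟨hsub, hlen⟩ := (PySem.List.mem_combinations_iff ns 3 l).mp hmem
        obtain ⟨a, b, c, rfl⟩ : ∃ a b c, l = [a, b, c] := by
          rcases l with _ | ⟨a, _ | ⟨b, _ | ⟨c, _ | ⟨d, rest⟩⟩⟩⟩
          · simp at hlen
          · simp at hlen
          · simp at hlen
          · exact ⟨a, b, c, rfl⟩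
          · simp at hlen
        have hpw := List.Pairwise.sublist hsub hnslt
        have hab : a < b := (List.pairwise_cons.mp hpw).1 b (by simp)
        have hbc : b < c :=
          (List.pairwise_cons.mp (List.pairwise_cons.mp hpw).2).1 c (by simp)
        have hq' : (PySem.Set.contains adj (a, b) && (PySem.Set.contains adj (a, c) &&
            PySem.Set.contains adj (b, c) && (PySem.Str.startswith a "t" ||
            PySem.Str.startswith b "t" || PySem.Str.startswith c "t"))) = true := hq
        simp only [Bool.and_eq_true] at hq'
        obtain ⟨hAB, ⟨hAC, hBC⟩, hT⟩ := hq'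
        have hseen' : (a, b, c) ∈ seenOf data := (mem_seenOf_iff_tri data a b c).mpr
          ⟨hab, hbc, (contains_adjSetOf data a b).mp hAB, (contains_adjSetOf data a c).mp hAC,
            (contains_adjSetOf data b c).mp hBC⟩
        have hpa' : pA (a, b, c) = true := by
          have : pA (a, b, c) = (PySem.Str.startswith a "t" || PySem.Str.startswith b "t" ||
              PySem.Str.startswith c "t") := by
            simp [pA, Bool.or_assoc]
          rw [this, hT]
        exact ⟨(a, b, c), ⟨hseen', hpa'⟩, rfl⟩
      · rintro ⟨⟨a, b, c⟩, ⟨hseen, hpa⟩, rfl⟩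
        obtain ⟨hab, hbc, hAB, hAC, hBC⟩ := (mem_seenOf_iff_tri data a b c).mp hseen
        refine ⟨(PySem.List.mem_combinations_iff ns 3 [a, b, c]).mpr
          ⟨sublist_of_pairwise_lt_subset ns [a, b, c] hnslt
            (pairwise_lt_triple hab hbc) ?_, rfl⟩, ?_⟩
        · intro z hz
          rcases List.mem_cons.mp hz with rfl | hz
          · exact (hnsmem z).mpr (inNodes_of_adj_left hAB)
          rcases List.mem_cons.mp hz with rfl | hz
          · exact (hnsmem z).mpr (inNodes_of_adj_right hAB)
          · rw [List.mem_singleton] at hz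
            subst hz
            exact (hnsmem z).mpr (inNodes_of_adj_right hBC)
        · have hT : pA (a, b, c) = (PySem.Str.startswith a "t" ||
              PySem.Str.startswith b "t" || PySem.Str.startswith c "t") := by
            simp [pA, Bool.or_assoc]
          show (PySem.Set.contains adj (a, b) && (PySem.Set.contains adj (a, c) &&
            PySem.Set.contains adj (b, c) && (PySem.Str.startswith a "t" ||
            PySem.Str.startswith b "t" || PySem.Str.startswith c "t"))) = true
          rw [(contains_adjSetOf data a b).mpr hAB, (contains_adjSetOf data a c).mpr hAC,
            (contains_adjSetOf data b c).mpr hBC, ← hT, hpa]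
          rfl
  rw [hperm.length_eq, List.length_map]

lemma part1_alt_eq (data : List (String × String)) :
    part1_alt data =
      altOuter (adjSetOf data) (PySem.List.sorted (nodesSetOf data) (fun x => x)) 0 := by
  unfold part1_alt
  rw [PySem.List.foldl_prod_mk
    (f := fun (s : PySem.Set String) (p : String × String) =>
      PySem.Set.add (PySem.Set.add s p.1) p.2)
    (g := fun (s : PySem.Set (String × String)) (p : String × String) =>
      PySem.Set.add (PySem.Set.add s (p.1, p.2)) (p.2, p.1))]
  rfl

-- ===== VERDICT (by name: the statement is the Claim_ definition above) =====
theorem part1_spec : Claim_equal_part1 := by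
  intro data _
  unfold Spec_part1
  rw [part1_eq_countP, part1_alt_eq, altOuter_eq, countP_comb_eq_countP_seen]
  simp
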